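-- pv_equiv track=rewrite | github.com/mhoskin-dsc/aoc | 2019/day12.py | update_vel
-- ===== SOURCE A (Python) =====
-- def update_vel(pos, vel):
--
--     delta_v = [[0,0,0],[0,0,0],[0,0,0],[0,0,0]]
--
--     for body_index, body in enumerate(pos):
--         for dim_index, dim in enumerate(body):
--             dv = 0
--             for body_compare in pos:
--                 other_dim = body_compare[dim_index]
--                 if dim > other_dim:
--                     temp_value = -1
--                 elif dim < other_dim:
--                     temp_value = +1
--                 else:
--                     temp_value = 0
--
--                 dv += temp_value
--
--             delta_v[body_index][dim_index] = dv
--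
--
--     for index, velocity in enumerate(vel):
--         vel[index] = [v + dv for v, dv in zip(vel[index], delta_v[index])]
--
--     return vel
-- ===== SOURCE B (Python) =====
-- def update_vel(pos, vel):
--     # Pairwise decomposition: each unordered pair (i, j) is compared once per
--     # dimension and updates both bodies' deltas at the same time.
--     # Like A, this mutates vel in place (reassigning vel[index]) and returns it.
--     delta = [[0, 0, 0], [0, 0, 0], [0, 0, 0], [0, 0, 0]]
--     n = len(pos)
--     for i in range(n):
--         for j in range(i + 1, n):
--             for d in range(len(pos[i])):
--                 a = pos[i][d]
--                 b = pos[j][d]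
--                 s = 1 if a < b else (-1 if b < a else 0)
--                 delta[i][d] += s
--                 delta[j][d] -= s
--     for index in range(len(vel)):
--         vel[index] = [v + dv for v, dv in zip(vel[index], delta[index])]
--     return vel
-- ===== Notes on version B (the rewrite author's own statement) =====
-- stated objective: alternative
-- what changed: Replaces A's per-body full scan (for each body and dimension, re-scan all bodies and sum comparison signs) with a single loop over unordered body pairs (i<j) that updates both bodies' delta entries at once, halving the comparisons; the final vel-update step is unchanged.
import Mathlib
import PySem

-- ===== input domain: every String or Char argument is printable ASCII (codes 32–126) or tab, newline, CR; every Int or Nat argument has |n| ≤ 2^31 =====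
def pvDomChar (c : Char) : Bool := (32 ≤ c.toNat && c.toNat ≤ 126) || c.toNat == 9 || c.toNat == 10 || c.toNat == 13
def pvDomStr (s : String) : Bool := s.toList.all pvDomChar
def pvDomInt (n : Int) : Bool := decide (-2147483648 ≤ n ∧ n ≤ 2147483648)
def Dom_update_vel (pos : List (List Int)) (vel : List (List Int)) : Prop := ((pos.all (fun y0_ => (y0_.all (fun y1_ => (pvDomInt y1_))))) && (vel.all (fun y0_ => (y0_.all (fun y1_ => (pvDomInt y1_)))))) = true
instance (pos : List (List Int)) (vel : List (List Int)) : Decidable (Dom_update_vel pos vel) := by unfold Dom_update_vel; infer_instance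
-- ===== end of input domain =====

-- B replaces A's per-body full scan by a single loop over unordered pairs (i<j) updating
-- both bodies' deltas at once (objective: alternative decomposition, same final apply step).
-- Both Pythons mutate `vel` in place (reassigning vel[index]); the equivalence proved here
-- is about the returned value, which is that same mutated list in both.

-- ===== PORT A =====
-- A's second loop (`for index, velocity in enumerate(vel): vel[index] = [...]`;
-- `velocity` is unused, each slot is read before being overwritten, so the live
-- iteration is a fold over the indices).  B's final step is literally the same code.
def applyVel (vel delta : List (List Int)) : List (List Int) :=
  (List.range vel.length).foldl
    (fun w i => w.set i (List.zipWith (fun v dv => v + dv) (w.getD i []) (delta.getD i []))) vel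

-- A's first loop building delta_v.  `delta_v[body_index][dim_index] = dv` mutates the
-- inner row in place -> List.modify; reads (body_compare[dim_index]) are rendered with
-- getD, exact on Pre_update_vel where every index Python touches is in range.
def deltaA (pos : List (List Int)) : List (List Int) :=
  pos.zipIdx.foldl
    (fun dv bi =>
      bi.1.zipIdx.foldl
        (fun dv2 di =>
          dv2.modify bi.2 (fun row => row.set di.2
            (pos.foldl
              (fun acc cmp =>
                acc + (if di.1 > cmp.getD di.2 0 then -1
                       else if di.1 < cmp.getD di.2 0 then 1 else 0)) 0)))
        dv)
    [[0,0,0],[0,0,0],[0,0,0],[0,0,0]]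

def update_vel (pos : List (List Int)) (vel : List (List Int)) : List (List Int) :=
  applyVel vel (deltaA pos)

-- ===== PORT B =====
-- delta[i][d] += x  (in-place update of one cell; exact on Pre_, where indices are in range)
def bump (dv : List (List Int)) (i d : Nat) (x : Int) : List (List Int) :=
  dv.modify i (fun row => row.modify d (fun v => v + x))

def deltaB (pos : List (List Int)) : List (List Int) :=
  (List.range pos.length).foldl
    (fun dv i =>
      (List.range' (i+1) (pos.length - (i+1))).foldl
        (fun dvj j =>
          (List.range (pos.getD i []).length).foldl
            (fun dvd d =>
              let a := (pos.getD i []).getD d 0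
              let b := (pos.getD j []).getD d 0
              let s : Int := if a < b then 1 else if b < a then -1 else 0
              bump (bump dvd i d s) j d (-s))
            dvj)
        dv)
    [[0,0,0],[0,0,0],[0,0,0],[0,0,0]]

def update_vel_alt (pos : List (List Int)) (vel : List (List Int)) : List (List Int) :=
  applyVel vel (deltaB pos)

-- ===== PRECONDITION & SPEC =====
-- Pre_ is exactly where Python A returns (no IndexError): at most 4 velocity rows, and
-- either every position row is empty, or there are at most 4 position rows, all of the
-- same length ≤ 3.
def Pre_update_vel (pos : List (List Int)) (vel : List (List Int)) : Prop :=
  vel.length ≤ 4 ∧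
    ((∀ r ∈ pos, r = []) ∨
      (pos.length ≤ 4 ∧ (∀ r ∈ pos, r.length ≤ 3) ∧
        ∀ r ∈ pos, ∀ r' ∈ pos, r.length = r'.length))
instance (pos : List (List Int)) (vel : List (List Int)) : Decidable (Pre_update_vel pos vel) := by
  unfold Pre_update_vel; infer_instance

def pvWitness_update_vel : List (List Int) × List (List Int) :=
  ([[3, 0, -2], [1, 2, 3], [4, -5, 6], [0, 8, 9]], [[0, 0, 0], [1, 1, 1], [0, -1, 0], [2, 0, 0]])

def Spec_update_vel (pos : List (List Int)) (vel : List (List Int)) (out : List (List Int)) : Prop := out = update_vel_alt pos vel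
instance (pos : List (List Int)) (vel : List (List Int)) (out : List (List Int)) : Decidable (Spec_update_vel pos vel out) := by unfold Spec_update_vel; infer_instance

-- ===== CLAIM (what is proved, stated in full; the proofs are below) =====
def Claim_equal_update_vel : Prop := ∀ (pos : List (List Int)) (vel : List (List Int)), Dom_update_vel pos vel → Pre_update_vel pos vel → Spec_update_vel pos vel (update_vel pos vel)

-- ===== LEMMAS AND PROOFS =====

theorem foldl_id {α β : Type} (f : β → α → β) (l : List α) (b : β)
    (h : ∀ x ∈ l, ∀ acc, f acc x = acc) : l.foldl f b = b := by
  induction l generalizing b with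
  | nil => rfl
  | cons y t ih =>
      simp only [List.foldl_cons, h y (by simp)]
      exact ih b (fun x hx acc => h x (by simp [hx]) acc)

theorem deltaA_empty_rows (pos : List (List Int)) (h : ∀ r ∈ pos, r = []) :
    deltaA pos = [[0,0,0],[0,0,0],[0,0,0],[0,0,0]] := by
  unfold deltaA
  refine foldl_id _ _ _ ?_
  rintro ⟨r, i⟩ hm acc
  have hr : r = [] := h r (List.fst_mem_of_mem_zipIdx hm)
  simp [hr]

theorem deltaB_empty_rows (pos : List (List Int)) (h : ∀ r ∈ pos, r = []) :
    deltaB pos = [[0,0,0],[0,0,0],[0,0,0],[0,0,0]] := by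
  unfold deltaB
  refine foldl_id _ _ _ ?_
  intro i hi acc
  refine foldl_id _ _ _ ?_
  intro j hj acc2
  have hnil : pos[i]?.getD [] = [] := by
    rcases Nat.lt_or_ge i pos.length with hlt | hge
    · rw [List.getElem?_eq_getElem hlt]
      exact h _ (List.getElem_mem hlt)
    · rw [List.getElem?_eq_none (by simpa using hge)]
      rfl
  simp [List.getD, hnil]

def tA (dim other : Int) : Int := if other < dim then -1 else if dim < other then 1 else 0

def sB (a b : Int) : Int := if a < b then 1 else if b < a then -1 else 0

theorem col_1_0 (c0 : Int) : (0 + tA c0 c0) = 0 := by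
  simp only [tA]; split_ifs <;> omega

theorem col_2_0 (c0 c1 : Int) : ((0 + tA c0 c0) + tA c0 c1) = (0 + sB c0 c1) := by
  simp only [tA, sB]; split_ifs <;> omega

theorem col_2_1 (c0 c1 : Int) : ((0 + tA c1 c0) + tA c1 c1) = (0 + -sB c0 c1) := by
  simp only [tA, sB]; split_ifs <;> omega

theorem col_3_0 (c0 c1 c2 : Int) : (((0 + tA c0 c0) + tA c0 c1) + tA c0 c2) = ((0 + sB c0 c1) + sB c0 c2) := by
  simp only [tA, sB]; split_ifs <;> omega

theorem col_3_1 (c0 c1 c2 : Int) : (((0 + tA c1 c0) + tA c1 c1) + tA c1 c2) = ((0 + -sB c0 c1) + sB c1 c2) := by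
  simp only [tA, sB]; split_ifs <;> omega

theorem col_3_2 (c0 c1 c2 : Int) : (((0 + tA c2 c0) + tA c2 c1) + tA c2 c2) = ((0 + -sB c0 c2) + -sB c1 c2) := by
  simp only [tA, sB]; split_ifs <;> omega

theorem col_4_0 (c0 c1 c2 c3 : Int) : ((((0 + tA c0 c0) + tA c0 c1) + tA c0 c2) + tA c0 c3) = (((0 + sB c0 c1) + sB c0 c2) + sB c0 c3) := by
  simp only [tA, sB]; split_ifs <;> omega

theorem col_4_1 (c0 c1 c2 c3 : Int) : ((((0 + tA c1 c0) + tA c1 c1) + tA c1 c2) + tA c1 c3) = (((0 + -sB c0 c1) + sB c1 c2) + sB c1 c3) := by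
  simp only [tA, sB]; split_ifs <;> omega

theorem col_4_2 (c0 c1 c2 c3 : Int) : ((((0 + tA c2 c0) + tA c2 c1) + tA c2 c2) + tA c2 c3) = (((0 + -sB c0 c2) + -sB c1 c2) + sB c2 c3) := by
  simp only [tA, sB]; split_ifs <;> omega

theorem col_4_3 (c0 c1 c2 c3 : Int) : ((((0 + tA c3 c0) + tA c3 c1) + tA c3 c2) + tA c3 c3) = (((0 + -sB c0 c3) + -sB c1 c3) + -sB c2 c3) := by
  simp only [tA, sB]; split_ifs <;> omega

set_option maxHeartbeats 2000000 in
theorem shape_1_0 : deltaA [[]] = deltaB [[]] := rfl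

set_option maxHeartbeats 2000000 in
theorem shape_1_1 (x0 : Int) : deltaA [[x0]] = deltaB [[x0]] := by
  change [[(0 + tA x0 x0), 0, 0], [0, 0, 0], [0, 0, 0], [0, 0, 0]] = [[0, 0, 0], [0, 0, 0], [0, 0, 0], [0, 0, 0]]
  rw [col_1_0 x0]

set_option maxHeartbeats 2000000 in
theorem shape_1_2 (x0 y0 : Int) : deltaA [[x0, y0]] = deltaB [[x0, y0]] := by
  change [[(0 + tA x0 x0), (0 + tA y0 y0), 0], [0, 0, 0], [0, 0, 0], [0, 0, 0]] = [[0, 0, 0], [0, 0, 0], [0, 0, 0], [0, 0, 0]]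
  rw [col_1_0 x0, col_1_0 y0]

set_option maxHeartbeats 2000000 in
theorem shape_1_3 (x0 y0 z0 : Int) : deltaA [[x0, y0, z0]] = deltaB [[x0, y0, z0]] := by
  change [[(0 + tA x0 x0), (0 + tA y0 y0), (0 + tA z0 z0)], [0, 0, 0], [0, 0, 0], [0, 0, 0]] = [[0, 0, 0], [0, 0, 0], [0, 0, 0], [0, 0, 0]]
  rw [col_1_0 x0, col_1_0 y0, col_1_0 z0]

set_option maxHeartbeats 2000000 in
theorem shape_2_0 : deltaA [[], []] = deltaB [[], []] := rfl

set_option maxHeartbeats 2000000 in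
theorem shape_2_1 (x0 x1 : Int) : deltaA [[x0], [x1]] = deltaB [[x0], [x1]] := by
  change [[((0 + tA x0 x0) + tA x0 x1), 0, 0], [((0 + tA x1 x0) + tA x1 x1), 0, 0], [0, 0, 0], [0, 0, 0]] = [[(0 + sB x0 x1), 0, 0], [(0 + -sB x0 x1), 0, 0], [0, 0, 0], [0, 0, 0]]
  rw [col_2_0 x0 x1, col_2_1 x0 x1]

set_option maxHeartbeats 2000000 in
theorem shape_2_2 (x0 y0 x1 y1 : Int) : deltaA [[x0, y0], [x1, y1]] = deltaB [[x0, y0], [x1, y1]] := by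
  change [[((0 + tA x0 x0) + tA x0 x1), ((0 + tA y0 y0) + tA y0 y1), 0], [((0 + tA x1 x0) + tA x1 x1), ((0 + tA y1 y0) + tA y1 y1), 0], [0, 0, 0], [0, 0, 0]] = [[(0 + sB x0 x1), (0 + sB y0 y1), 0], [(0 + -sB x0 x1), (0 + -sB y0 y1), 0], [0, 0, 0], [0, 0, 0]]
  rw [col_2_0 x0 x1, col_2_0 y0 y1, col_2_1 x0 x1, col_2_1 y0 y1]

set_option maxHeartbeats 2000000 in
theorem shape_2_3 (x0 y0 z0 x1 y1 z1 : Int) : deltaA [[x0, y0, z0], [x1, y1, z1]] = deltaB [[x0, y0, z0], [x1, y1, z1]] := by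
  change [[((0 + tA x0 x0) + tA x0 x1), ((0 + tA y0 y0) + tA y0 y1), ((0 + tA z0 z0) + tA z0 z1)], [((0 + tA x1 x0) + tA x1 x1), ((0 + tA y1 y0) + tA y1 y1), ((0 + tA z1 z0) + tA z1 z1)], [0, 0, 0], [0, 0, 0]] = [[(0 + sB x0 x1), (0 + sB y0 y1), (0 + sB z0 z1)], [(0 + -sB x0 x1), (0 + -sB y0 y1), (0 + -sB z0 z1)], [0, 0, 0], [0, 0, 0]]
  rw [col_2_0 x0 x1, col_2_0 y0 y1, col_2_0 z0 z1, col_2_1 x0 x1, col_2_1 y0 y1, col_2_1 z0 z1]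

set_option maxHeartbeats 2000000 in
theorem shape_3_0 : deltaA [[], [], []] = deltaB [[], [], []] := rfl

set_option maxHeartbeats 2000000 in
theorem shape_3_1 (x0 x1 x2 : Int) : deltaA [[x0], [x1], [x2]] = deltaB [[x0], [x1], [x2]] := by
  change [[(((0 + tA x0 x0) + tA x0 x1) + tA x0 x2), 0, 0], [(((0 + tA x1 x0) + tA x1 x1) + tA x1 x2), 0, 0], [(((0 + tA x2 x0) + tA x2 x1) + tA x2 x2), 0, 0], [0, 0, 0]] = [[((0 + sB x0 x1) + sB x0 x2), 0, 0], [((0 + -sB x0 x1) + sB x1 x2), 0, 0], [((0 + -sB x0 x2) + -sB x1 x2), 0, 0], [0, 0, 0]]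
  rw [col_3_0 x0 x1 x2, col_3_1 x0 x1 x2, col_3_2 x0 x1 x2]

set_option maxHeartbeats 2000000 in
theorem shape_3_2 (x0 y0 x1 y1 x2 y2 : Int) : deltaA [[x0, y0], [x1, y1], [x2, y2]] = deltaB [[x0, y0], [x1, y1], [x2, y2]] := by
  change [[(((0 + tA x0 x0) + tA x0 x1) + tA x0 x2), (((0 + tA y0 y0) + tA y0 y1) + tA y0 y2), 0], [(((0 + tA x1 x0) + tA x1 x1) + tA x1 x2), (((0 + tA y1 y0) + tA y1 y1) + tA y1 y2), 0], [(((0 + tA x2 x0) + tA x2 x1) + tA x2 x2), (((0 + tA y2 y0) + tA y2 y1) + tA y2 y2), 0], [0, 0, 0]] = [[((0 + sB x0 x1) + sB x0 x2), ((0 + sB y0 y1) + sB y0 y2), 0], [((0 + -sB x0 x1) + sB x1 x2), ((0 + -sB y0 y1) + sB y1 y2), 0], [((0 + -sB x0 x2) + -sB x1 x2), ((0 + -sB y0 y2) + -sB y1 y2), 0], [0, 0, 0]]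
  rw [col_3_0 x0 x1 x2, col_3_0 y0 y1 y2, col_3_1 x0 x1 x2, col_3_1 y0 y1 y2, col_3_2 x0 x1 x2, col_3_2 y0 y1 y2]

set_option maxHeartbeats 2000000 in
theorem shape_3_3 (x0 y0 z0 x1 y1 z1 x2 y2 z2 : Int) : deltaA [[x0, y0, z0], [x1, y1, z1], [x2, y2, z2]] = deltaB [[x0, y0, z0], [x1, y1, z1], [x2, y2, z2]] := by
  change [[(((0 + tA x0 x0) + tA x0 x1) + tA x0 x2), (((0 + tA y0 y0) + tA y0 y1) + tA y0 y2), (((0 + tA z0 z0) + tA z0 z1) + tA z0 z2)], [(((0 + tA x1 x0) + tA x1 x1) + tA x1 x2), (((0 + tA y1 y0) + tA y1 y1) + tA y1 y2), (((0 + tA z1 z0) + tA z1 z1) + tA z1 z2)], [(((0 + tA x2 x0) + tA x2 x1) + tA x2 x2), (((0 + tA y2 y0) + tA y2 y1) + tA y2 y2), (((0 + tA z2 z0) + tA z2 z1) + tA z2 z2)], [0, 0, 0]] = [[((0 + sB x0 x1) + sB x0 x2), ((0 + sB y0 y1) + sB y0 y2), ((0 + sB z0 z1) + sB z0 z2)],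 [((0 + -sB x0 x1) + sB x1 x2), ((0 + -sB y0 y1) + sB y1 y2), ((0 + -sB z0 z1) + sB z1 z2)], [((0 + -sB x0 x2) + -sB x1 x2), ((0 + -sB y0 y2) + -sB y1 y2), ((0 + -sB z0 z2) + -sB z1 z2)], [0, 0, 0]]
  rw [col_3_0 x0 x1 x2, col_3_0 y0 y1 y2, col_3_0 z0 z1 z2, col_3_1 x0 x1 x2, col_3_1 y0 y1 y2, col_3_1 z0 z1 z2, col_3_2 x0 x1 x2, col_3_2 y0 y1 y2, col_3_2 z0 z1 z2]

set_option maxHeartbeats 2000000 in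
theorem shape_4_0 : deltaA [[], [], [], []] = deltaB [[], [], [], []] := rfl

set_option maxHeartbeats 2000000 in
theorem shape_4_1 (x0 x1 x2 x3 : Int) : deltaA [[x0], [x1], [x2], [x3]] = deltaB [[x0], [x1], [x2], [x3]] := by
  change [[((((0 + tA x0 x0) + tA x0 x1) + tA x0 x2) + tA x0 x3), 0, 0], [((((0 + tA x1 x0) + tA x1 x1) + tA x1 x2) + tA x1 x3), 0, 0], [((((0 + tA x2 x0) + tA x2 x1) + tA x2 x2) + tA x2 x3), 0, 0], [((((0 + tA x3 x0) + tA x3 x1) + tA x3 x2) + tA x3 x3), 0, 0]] = [[(((0 + sB x0 x1) + sB x0 x2) + sB x0 x3), 0, 0], [(((0 + -sB x0 x1) + sB x1 x2) + sB x1 x3), 0, 0], [(((0 + -sB x0 x2) + -sB x1 x2) + sB x2 x3), 0, 0], [(((0 + -sB x0 x3) + -sB x1 x3) + -sB x2 x3), 0, 0]]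
  rw [col_4_0 x0 x1 x2 x3, col_4_1 x0 x1 x2 x3, col_4_2 x0 x1 x2 x3, col_4_3 x0 x1 x2 x3]

set_option maxHeartbeats 2000000 in
theorem shape_4_2 (x0 y0 x1 y1 x2 y2 x3 y3 : Int) : deltaA [[x0, y0], [x1, y1], [x2, y2], [x3, y3]] = deltaB [[x0, y0], [x1, y1], [x2, y2], [x3, y3]] := by
  change [[((((0 + tA x0 x0) + tA x0 x1) + tA x0 x2) + tA x0 x3), ((((0 + tA y0 y0) + tA y0 y1) + tA y0 y2) + tA y0 y3), 0], [((((0 + tA x1 x0) + tA x1 x1) + tA x1 x2) + tA x1 x3), ((((0 + tA y1 y0) + tA y1 y1) + tA y1 y2) + tA y1 y3), 0], [((((0 + tA x2 x0) + tA x2 x1) + tA x2 x2) + tA x2 x3), ((((0 + tA y2 y0) + tA y2 y1) + tA y2 y2) + tA y2 y3), 0], [((((0 + tA x3 x0) + tA x3 x1) + tA x3 x2) + tA x3 x3), ((((0 + tA y3 y0) + tA y3 y1) + tA y3 y2) + tA y3 y3), 0]] = [[(((0 + sB x0 x1) + sB x0 x2) + sB x0 x3), (((0 + sB y0 y1) +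 sB y0 y2) + sB y0 y3), 0], [(((0 + -sB x0 x1) + sB x1 x2) + sB x1 x3), (((0 + -sB y0 y1) + sB y1 y2) + sB y1 y3), 0], [(((0 + -sB x0 x2) + -sB x1 x2) + sB x2 x3), (((0 + -sB y0 y2) + -sB y1 y2) + sB y2 y3), 0], [(((0 + -sB x0 x3) + -sB x1 x3) + -sB x2 x3), (((0 + -sB y0 y3) + -sB y1 y3) + -sB y2 y3), 0]]
  rw [col_4_0 x0 x1 x2 x3, col_4_0 y0 y1 y2 y3, col_4_1 x0 x1 x2 x3, col_4_1 y0 y1 y2 y3, col_4_2 x0 x1 x2 x3, col_4_2 y0 y1 y2 y3, col_4_3 x0 x1 x2 x3, col_4_3 y0 y1 y2 y3]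

set_option maxHeartbeats 2000000 in
theorem shape_4_3 (x0 y0 z0 x1 y1 z1 x2 y2 z2 x3 y3 z3 : Int) : deltaA [[x0, y0, z0], [x1, y1, z1], [x2, y2, z2], [x3, y3, z3]] = deltaB [[x0, y0, z0], [x1, y1, z1], [x2, y2, z2], [x3, y3, z3]] := by
  change [[((((0 + tA x0 x0) + tA x0 x1) + tA x0 x2) + tA x0 x3), ((((0 + tA y0 y0) + tA y0 y1) + tA y0 y2) + tA y0 y3), ((((0 + tA z0 z0) + tA z0 z1) + tA z0 z2) + tA z0 z3)], [((((0 + tA x1 x0) + tA x1 x1) + tA x1 x2) + tA x1 x3), ((((0 + tA y1 y0) + tA y1 y1) + tA y1 y2) + tA y1 y3), ((((0 + tA z1 z0) + tA z1 z1) + tA z1 z2) + tA z1 z3)], [((((0 + tA x2 x0) + tA x2 x1) + tA x2 x2) + tA x2 x3), ((((0 + tA y2 y0) + tA y2 y1) + tA y2 y2) + tA y2 y3), ((((0 + tA z2 z0) + tA z2 z1) + tA z2 z2) + tA z2 z3)], [((((0 + tA x3 x0) + tA x3 x1) + tA x3 x2) + tA x3 x3), ((((0 + tA y3 y0) + tA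 y3 y1) + tA y3 y2) + tA y3 y3), ((((0 + tA z3 z0) + tA z3 z1) + tA z3 z2) + tA z3 z3)]] = [[(((0 + sB x0 x1) + sB x0 x2) + sB x0 x3), (((0 + sB y0 y1) + sB y0 y2) + sB y0 y3), (((0 + sB z0 z1) + sB z0 z2) + sB z0 z3)], [(((0 + -sB x0 x1) + sB x1 x2) + sB x1 x3), (((0 + -sB y0 y1) + sB y1 y2) + sB y1 y3), (((0 + -sB z0 z1) + sB z1 z2) + sB z1 z3)], [(((0 + -sB x0 x2) + -sB x1 x2) + sB x2 x3), (((0 + -sB y0 y2) + -sB y1 y2) + sB y2 y3), (((0 + -sB z0 z2) + -sB z1 z2) + sB z2 z3)], [(((0 + -sB x0 x3) + -sB x1 x3) + -sB x2 x3), (((0 + -sB y0 y3) + -sB y1 y3) + -sB y2 y3), (((0 + -sB z0 z3) + -sB z1 z3) + -sB z2 z3)]]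
  rw [col_4_0 x0 x1 x2 x3, col_4_0 y0 y1 y2 y3, col_4_0 z0 z1 z2 z3, col_4_1 x0 x1 x2 x3, col_4_1 y0 y1 y2 y3, col_4_1 z0 z1 z2 z3, col_4_2 x0 x1 x2 x3, col_4_2 y0 y1 y2 y3, col_4_2 z0 z1 z2 z3, col_4_3 x0 x1 x2 x3, col_4_3 y0 y1 y2 y3, col_4_3 z0 z1 z2 z3]

theorem delta_eq (pos : List (List Int)) (hlen : pos.length ≤ 4)
    (hrow : ∀ r ∈ pos, r.length ≤ 3)
    (heq : ∀ r ∈ pos, ∀ r' ∈ pos, r.length = r'.length) :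
    deltaA pos = deltaB pos := by
  rcases pos with _ | ⟨r0, pos⟩
  · rfl
  ·
    rcases pos with _ | ⟨r1, pos⟩
    ·
      rcases r0 with _ | ⟨x0, r0⟩
      ·
        exact shape_1_0
      ·
        rcases r0 with _ | ⟨y0, r0⟩
        ·
          exact shape_1_1 x0
        ·
          rcases r0 with _ | ⟨z0, r0⟩
          ·
            exact shape_1_2 x0 y0
          ·
            rcases r0 with _ | ⟨w0, r0⟩
            ·
              exact shape_1_3 x0 y0 z0
            · exact absurd (hrow (x0 :: y0 :: z0 :: w0 :: r0) (by simp)) (by simp only [List.length_cons]; omega)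
    ·
      rcases pos with _ | ⟨r2, pos⟩
      ·
        rcases r0 with _ | ⟨x0, r0⟩
        ·
          rcases r1 with _ | ⟨x1, r1⟩
          ·
            exact shape_2_0
          ·
            exact absurd (heq ([] : List Int) (by simp) (x1 :: r1) (by simp)) (by simp only [List.length_cons, List.length_nil]; omega)
        ·
          rcases r0 with _ | ⟨y0, r0⟩
          ·
            rcases r1 with _ | ⟨x1, r1⟩
            ·
              exact absurd (heq [x0] (by simp) ([] : List Int) (by simp)) (by simp only [List.length_cons, List.length_nil]; omega)
            ·
              rcases r1 with _ | ⟨y1, r1⟩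
              ·
                exact shape_2_1 x0 x1
              ·
                exact absurd (heq [x0] (by simp) (x1 :: y1 :: r1) (by simp)) (by simp only [List.length_cons, List.length_nil]; omega)
          ·
            rcases r0 with _ | ⟨z0, r0⟩
            ·
              rcases r1 with _ | ⟨x1, r1⟩
              ·
                exact absurd (heq [x0, y0] (by simp) ([] : List Int) (by simp)) (by simp only [List.length_cons, List.length_nil]; omega)
              ·
                rcases r1 with _ | ⟨y1, r1⟩
                ·
                  exact absurd (heq [x0, y0] (by simp) [x1] (by simp)) (by simp only [List.length_cons, List.length_nil]; omega)
                ·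
                  rcases r1 with _ | ⟨z1, r1⟩
                  ·
                    exact shape_2_2 x0 y0 x1 y1
                  ·
                    exact absurd (heq [x0, y0] (by simp) (x1 :: y1 :: z1 :: r1) (by simp)) (by simp only [List.length_cons, List.length_nil]; omega)
            ·
              rcases r0 with _ | ⟨w0, r0⟩
              ·
                rcases r1 with _ | ⟨x1, r1⟩
                ·
                  exact absurd (heq [x0, y0, z0] (by simp) ([] : List Int) (by simp)) (by simp only [List.length_cons, List.length_nil]; omega)
                ·
                  rcases r1 with _ | ⟨y1, r1⟩
                  ·
                    exact absurd (heq [x0, y0, z0] (by simp) [x1] (by simp)) (by simp only [List.length_cons, List.length_nil]; omega)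
                  ·
                    rcases r1 with _ | ⟨z1, r1⟩
                    ·
                      exact absurd (heq [x0, y0, z0] (by simp) [x1, y1] (by simp)) (by simp only [List.length_cons, List.length_nil]; omega)
                    ·
                      rcases r1 with _ | ⟨w1, r1⟩
                      ·
                        exact shape_2_3 x0 y0 z0 x1 y1 z1
                      ·
                        exact absurd (heq [x0, y0, z0] (by simp) (x1 :: y1 :: z1 :: w1 :: r1) (by simp)) (by simp only [List.length_cons, List.length_nil]; omega)
              · exact absurd (hrow (x0 :: y0 :: z0 :: w0 :: r0) (by simp)) (by simp only [List.length_cons]; omega)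
      ·
        rcases pos with _ | ⟨r3, pos⟩
        ·
          rcases r0 with _ | ⟨x0, r0⟩
          ·
            rcases r1 with _ | ⟨x1, r1⟩
            ·
              rcases r2 with _ | ⟨x2, r2⟩
              ·
                exact shape_3_0
              ·
                exact absurd (heq ([] : List Int) (by simp) (x2 :: r2) (by simp)) (by simp only [List.length_cons, List.length_nil]; omega)
            ·
              exact absurd (heq ([] : List Int) (by simp) (x1 :: r1) (by simp)) (by simp only [List.length_cons, List.length_nil]; omega)
          ·
            rcases r0 with _ | ⟨y0, r0⟩
            ·
              rcases r1 with _ | ⟨x1, r1⟩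
              ·
                exact absurd (heq [x0] (by simp) ([] : List Int) (by simp)) (by simp only [List.length_cons, List.length_nil]; omega)
              ·
                rcases r1 with _ | ⟨y1, r1⟩
                ·
                  rcases r2 with _ | ⟨x2, r2⟩
                  ·
                    exact absurd (heq [x0] (by simp) ([] : List Int) (by simp)) (by simp only [List.length_cons, List.length_nil]; omega)
                  ·
                    rcases r2 with _ | ⟨y2, r2⟩
                    ·
                      exact shape_3_1 x0 x1 x2
                    ·
                      exact absurd (heq [x0] (by simp) (x2 :: y2 :: r2) (by simp)) (by simp only [List.length_cons, List.length_nil]; omega)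
                ·
                  exact absurd (heq [x0] (by simp) (x1 :: y1 :: r1) (by simp)) (by simp only [List.length_cons, List.length_nil]; omega)
            ·
              rcases r0 with _ | ⟨z0, r0⟩
              ·
                rcases r1 with _ | ⟨x1, r1⟩
                ·
                  exact absurd (heq [x0, y0] (by simp) ([] : List Int) (by simp)) (by simp only [List.length_cons, List.length_nil]; omega)
                ·
                  rcases r1 with _ | ⟨y1, r1⟩
                  ·
                    exact absurd (heq [x0, y0] (by simp) [x1] (by simp)) (by simp only [List.length_cons, List.length_nil]; omega)
                  ·
                    rcases r1 with _ | ⟨z1, r1⟩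
                    ·
                      rcases r2 with _ | ⟨x2, r2⟩
                      ·
                        exact absurd (heq [x0, y0] (by simp) ([] : List Int) (by simp)) (by simp only [List.length_cons, List.length_nil]; omega)
                      ·
                        rcases r2 with _ | ⟨y2, r2⟩
                        ·
                          exact absurd (heq [x0, y0] (by simp) [x2] (by simp)) (by simp only [List.length_cons, List.length_nil]; omega)
                        ·
                          rcases r2 with _ | ⟨z2, r2⟩
                          ·
                            exact shape_3_2 x0 y0 x1 y1 x2 y2
                          ·
                            exact absurd (heq [x0, y0] (by simp) (x2 :: y2 :: z2 :: r2) (by simp)) (by simp only [List.length_cons, List.length_nil]; omega)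
                    ·
                      exact absurd (heq [x0, y0] (by simp) (x1 :: y1 :: z1 :: r1) (by simp)) (by simp only [List.length_cons, List.length_nil]; omega)
              ·
                rcases r0 with _ | ⟨w0, r0⟩
                ·
                  rcases r1 with _ | ⟨x1, r1⟩
                  ·
                    exact absurd (heq [x0, y0, z0] (by simp) ([] : List Int) (by simp)) (by simp only [List.length_cons, List.length_nil]; omega)
                  ·
                    rcases r1 with _ | ⟨y1, r1⟩
                    ·
                      exact absurd (heq [x0, y0, z0] (by simp) [x1] (by simp)) (by simp only [List.length_cons, List.length_nil]; omega)
                    ·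
                      rcases r1 with _ | ⟨z1, r1⟩
                      ·
                        exact absurd (heq [x0, y0, z0] (by simp) [x1, y1] (by simp)) (by simp only [List.length_cons, List.length_nil]; omega)
                      ·
                        rcases r1 with _ | ⟨w1, r1⟩
                        ·
                          rcases r2 with _ | ⟨x2, r2⟩
                          ·
                            exact absurd (heq [x0, y0, z0] (by simp) ([] : List Int) (by simp)) (by simp only [List.length_cons, List.length_nil]; omega)
                          ·
                            rcases r2 with _ | ⟨y2, r2⟩
                            ·
                              exact absurd (heq [x0, y0, z0] (by simp) [x2] (by simp)) (by simp only [List.length_cons, List.length_nil]; omega)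
                            ·
                              rcases r2 with _ | ⟨z2, r2⟩
                              ·
                                exact absurd (heq [x0, y0, z0] (by simp) [x2, y2] (by simp)) (by simp only [List.length_cons, List.length_nil]; omega)
                              ·
                                rcases r2 with _ | ⟨w2, r2⟩
                                ·
                                  exact shape_3_3 x0 y0 z0 x1 y1 z1 x2 y2 z2
                                ·
                                  exact absurd (heq [x0, y0, z0] (by simp) (x2 :: y2 :: z2 :: w2 :: r2) (by simp)) (by simp only [List.length_cons, List.length_nil]; omega)
                        ·
                          exact absurd (heq [x0, y0, z0] (by simp) (x1 :: y1 :: z1 :: w1 :: r1) (by simp)) (by simp only [List.length_cons, List.length_nil]; omega)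
                · exact absurd (hrow (x0 :: y0 :: z0 :: w0 :: r0) (by simp)) (by simp only [List.length_cons]; omega)
        ·
          rcases pos with _ | ⟨r4, pos⟩
          ·
            rcases r0 with _ | ⟨x0, r0⟩
            ·
              rcases r1 with _ | ⟨x1, r1⟩
              ·
                rcases r2 with _ | ⟨x2, r2⟩
                ·
                  rcases r3 with _ | ⟨x3, r3⟩
                  ·
                    exact shape_4_0
                  ·
                    exact absurd (heq ([] : List Int) (by simp) (x3 :: r3) (by simp)) (by simp only [List.length_cons, List.length_nil]; omega)
                ·
                  exact absurd (heq ([] : List Int) (by simp) (x2 :: r2) (by simp)) (by simp only [List.length_cons, List.length_nil]; omega)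
              ·
                exact absurd (heq ([] : List Int) (by simp) (x1 :: r1) (by simp)) (by simp only [List.length_cons, List.length_nil]; omega)
            ·
              rcases r0 with _ | ⟨y0, r0⟩
              ·
                rcases r1 with _ | ⟨x1, r1⟩
                ·
                  exact absurd (heq [x0] (by simp) ([] : List Int) (by simp)) (by simp only [List.length_cons, List.length_nil]; omega)
                ·
                  rcases r1 with _ | ⟨y1, r1⟩
                  ·
                    rcases r2 with _ | ⟨x2, r2⟩
                    ·
                      exact absurd (heq [x0] (by simp) ([] : List Int) (by simp)) (by simp only [List.length_cons, List.length_nil]; omega)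
                    ·
                      rcases r2 with _ | ⟨y2, r2⟩
                      ·
                        rcases r3 with _ | ⟨x3, r3⟩
                        ·
                          exact absurd (heq [x0] (by simp) ([] : List Int) (by simp)) (by simp only [List.length_cons, List.length_nil]; omega)
                        ·
                          rcases r3 with _ | ⟨y3, r3⟩
                          ·
                            exact shape_4_1 x0 x1 x2 x3
                          ·
                            exact absurd (heq [x0] (by simp) (x3 :: y3 :: r3) (by simp)) (by simp only [List.length_cons, List.length_nil]; omega)
                      ·
                        exact absurd (heq [x0] (by simp) (x2 :: y2 :: r2) (by simp)) (by simp only [List.length_cons, List.length_nil]; omega)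
                  ·
                    exact absurd (heq [x0] (by simp) (x1 :: y1 :: r1) (by simp)) (by simp only [List.length_cons, List.length_nil]; omega)
              ·
                rcases r0 with _ | ⟨z0, r0⟩
                ·
                  rcases r1 with _ | ⟨x1, r1⟩
                  ·
                    exact absurd (heq [x0, y0] (by simp) ([] : List Int) (by simp)) (by simp only [List.length_cons, List.length_nil]; omega)
                  ·
                    rcases r1 with _ | ⟨y1, r1⟩
                    ·
                      exact absurd (heq [x0, y0] (by simp) [x1] (by simp)) (by simp only [List.length_cons, List.length_nil]; omega)
                    ·
                      rcases r1 with _ | ⟨z1, r1⟩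
                      ·
                        rcases r2 with _ | ⟨x2, r2⟩
                        ·
                          exact absurd (heq [x0, y0] (by simp) ([] : List Int) (by simp)) (by simp only [List.length_cons, List.length_nil]; omega)
                        ·
                          rcases r2 with _ | ⟨y2, r2⟩
                          ·
                            exact absurd (heq [x0, y0] (by simp) [x2] (by simp)) (by simp only [List.length_cons, List.length_nil]; omega)
                          ·
                            rcases r2 with _ | ⟨z2, r2⟩
                            ·
                              rcases r3 with _ | ⟨x3, r3⟩
                              ·
                                exact absurd (heq [x0, y0] (by simp) ([] : List Int) (by simp)) (by simp only [List.length_cons, List.length_nil]; omega)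
                              ·
                                rcases r3 with _ | ⟨y3, r3⟩
                                ·
                                  exact absurd (heq [x0, y0] (by simp) [x3] (by simp)) (by simp only [List.length_cons, List.length_nil]; omega)
                                ·
                                  rcases r3 with _ | ⟨z3, r3⟩
                                  ·
                                    exact shape_4_2 x0 y0 x1 y1 x2 y2 x3 y3
                                  ·
                                    exact absurd (heq [x0, y0] (by simp) (x3 :: y3 :: z3 :: r3) (by simp)) (by simp only [List.length_cons, List.length_nil]; omega)
                            ·
                              exact absurd (heq [x0, y0] (by simp) (x2 :: y2 :: z2 :: r2) (by simp)) (by simp only [List.length_cons, List.length_nil]; omega)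
                      ·
                        exact absurd (heq [x0, y0] (by simp) (x1 :: y1 :: z1 :: r1) (by simp)) (by simp only [List.length_cons, List.length_nil]; omega)
                ·
                  rcases r0 with _ | ⟨w0, r0⟩
                  ·
                    rcases r1 with _ | ⟨x1, r1⟩
                    ·
                      exact absurd (heq [x0, y0, z0] (by simp) ([] : List Int) (by simp)) (by simp only [List.length_cons, List.length_nil]; omega)
                    ·
                      rcases r1 with _ | ⟨y1, r1⟩
                      ·
                        exact absurd (heq [x0, y0, z0] (by simp) [x1] (by simp)) (by simp only [List.length_cons, List.length_nil]; omega)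
                      ·
                        rcases r1 with _ | ⟨z1, r1⟩
                        ·
                          exact absurd (heq [x0, y0, z0] (by simp) [x1, y1] (by simp)) (by simp only [List.length_cons, List.length_nil]; omega)
                        ·
                          rcases r1 with _ | ⟨w1, r1⟩
                          ·
                            rcases r2 with _ | ⟨x2, r2⟩
                            ·
                              exact absurd (heq [x0, y0, z0] (by simp) ([] : List Int) (by simp)) (by simp only [List.length_cons, List.length_nil]; omega)
                            ·
                              rcases r2 with _ | ⟨y2, r2⟩
                              ·
                                exact absurd (heq [x0, y0, z0] (by simp) [x2] (by simp)) (by simp only [List.length_cons, List.length_nil]; omega)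
                              ·
                                rcases r2 with _ | ⟨z2, r2⟩
                                ·
                                  exact absurd (heq [x0, y0, z0] (by simp) [x2, y2] (by simp)) (by simp only [List.length_cons, List.length_nil]; omega)
                                ·
                                  rcases r2 with _ | ⟨w2, r2⟩
                                  ·
                                    rcases r3 with _ | ⟨x3, r3⟩
                                    ·
                                      exact absurd (heq [x0, y0, z0] (by simp) ([] : List Int) (by simp)) (by simp only [List.length_cons, List.length_nil]; omega)
                                    ·
                                      rcases r3 with _ | ⟨y3, r3⟩
                                      ·
                                        exact absurd (heq [x0, y0, z0] (by simp) [x3] (by simp)) (by simp only [List.length_cons, List.length_nil]; omega)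
                                      ·
                                        rcases r3 with _ | ⟨z3, r3⟩
                                        ·
                                          exact absurd (heq [x0, y0, z0] (by simp) [x3, y3] (by simp)) (by simp only [List.length_cons, List.length_nil]; omega)
                                        ·
                                          rcases r3 with _ | ⟨w3, r3⟩
                                          ·
                                            exact shape_4_3 x0 y0 z0 x1 y1 z1 x2 y2 z2 x3 y3 z3
                                          ·
                                            exact absurd (heq [x0, y0, z0] (by simp) (x3 :: y3 :: z3 :: w3 :: r3) (by simp)) (by simp only [List.length_cons, List.length_nil]; omega)
                                  ·
                                    exact absurd (heq [x0, y0, z0] (by simp) (x2 :: y2 :: z2 :: w2 :: r2) (by simp)) (by simp only [List.length_cons, List.length_nil]; omega)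
                          ·
                            exact absurd (heq [x0, y0, z0] (by simp) (x1 :: y1 :: z1 :: w1 :: r1) (by simp)) (by simp only [List.length_cons, List.length_nil]; omega)
                  · exact absurd (hrow (x0 :: y0 :: z0 :: w0 :: r0) (by simp)) (by simp only [List.length_cons]; omega)
          ·
            exact absurd hlen (by simp only [List.length_cons]; omega)

theorem delta_eq_all (pos : List (List Int))
    (h : (∀ r ∈ pos, r = []) ∨
      (pos.length ≤ 4 ∧ (∀ r ∈ pos, r.length ≤ 3) ∧
        ∀ r ∈ pos, ∀ r' ∈ pos, r.length = r'.length)) :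
    deltaA pos = deltaB pos := by
  rcases h with h | ⟨h1, h2, h3⟩
  · rw [deltaA_empty_rows pos h, deltaB_empty_rows pos h]
  · exact delta_eq pos h1 h2 h3

-- ===== VERDICT (by name: the statement is the Claim_ definition above) =====
theorem update_vel_spec : Claim_equal_update_vel := by
  intro pos vel _ hpre
  unfold Spec_update_vel update_vel update_vel_alt
  rw [delta_eq_all pos hpre.2]
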